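-- pv_equiv track=rewrite | github.com/EmmanuelOgbewe/BWT_Variant | helpers.py | occurenceTable
-- ===== SOURCE A (Python) =====
-- def occurenceTable(characterList,lastCol):
--     #return column of indices for each character
--     characters =  ['A','C','G','T'] if characterList == None else characterList
--     result = { }
--     row = 0
--     for c1 in range(0,len(lastCol)):
--         for c2 in characters:
--             if lastCol[c1] == c2:
--                 if c2 in result.keys():
--                     result[c2].append(result[c2][c1 - 1] + 1)
--                 else:
--                     result[c2] = [1]
--             elif c1 > 0:
--                 if c2 in result.keys():
--                     result[c2].append(result[c2][c1 - 1])
--             else: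
--                 result[c2] = [0]
--     return result
-- ===== SOURCE B (Python) =====
-- def occurenceTable(characterList, lastCol):
--     # B: build each character's rank column independently as a prefix-count scan
--     # (A does one interleaved pass over positions with an inner loop over characters
--     # mutating a shared dict).
--     characters = ['A', 'C', 'G', 'T'] if characterList is None else characterList
--     if not lastCol:
--         return {}
--     result = {}
--     for c in characters:
--         ranks = []
--         count = 0
--         for x in lastCol:
--             if x == c:
--                 count += 1
--             ranks.append(count)
--         result[c] = ranks
--     return result
-- ===== Notes on version B (the rewrite author's own statement) =====
-- stated objective: simpler
-- what changed: B builds each character's rank column independently as a per-character prefix-count scan over lastCol, replacing A's single interleaved position-outer/character-inner pass that mutates a shared dict; Pre_ excludes character lists with duplicate entries (with non-empty lastCol), on which A's value is an accidental artefact of hitting the same dict key once per duplicate and B's clean per-character table is equally unspecified.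
-- outside the precondition, e.g. on occurenceTable(['A', 'A'], ['A']): A returns {'A': [1, 2]}, B returns {'A': [1]}
import Mathlib
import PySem

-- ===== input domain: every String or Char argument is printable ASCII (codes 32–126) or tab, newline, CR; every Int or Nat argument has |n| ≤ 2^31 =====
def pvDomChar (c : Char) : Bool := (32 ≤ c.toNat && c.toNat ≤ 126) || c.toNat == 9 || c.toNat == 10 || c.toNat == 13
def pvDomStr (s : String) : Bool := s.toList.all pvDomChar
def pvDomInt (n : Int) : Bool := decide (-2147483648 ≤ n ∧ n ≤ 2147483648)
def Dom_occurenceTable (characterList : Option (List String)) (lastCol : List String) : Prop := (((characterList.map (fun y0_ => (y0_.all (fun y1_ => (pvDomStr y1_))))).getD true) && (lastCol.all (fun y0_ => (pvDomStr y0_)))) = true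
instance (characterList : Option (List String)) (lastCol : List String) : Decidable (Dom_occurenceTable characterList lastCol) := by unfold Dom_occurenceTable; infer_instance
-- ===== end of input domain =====

-- B replaces A's interleaved position-outer/character-inner dict pass by independent
-- per-character prefix-count scans (simpler decomposition; same asymptotic cost).


-- ===== PORT A =====
-- literal transliteration of A; 'row = 0' in A is dead code and is omitted;
-- result[c2][c1 - 1] is PySem.List.pyGetD (in-range on every admitted input, A never raises)
def occurenceTable (characterList : Option (List String)) (lastCol : List String) : List (String × List Int) :=
  let characters := match characterList with
    | none => ["A", "C", "G", "T"]
    | some l => l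
  let result := (PySem.List.pyRange 0 (lastCol.length : Int) 1).foldl (fun result c1 =>
    characters.foldl (fun result c2 =>
      if PySem.List.pyGetD lastCol c1 "" == c2 then
        if result.contains c2 then
          result.insert c2 ((result.getD c2 []) ++ [PySem.List.pyGetD (result.getD c2 []) (c1 - 1) 0 + 1])
        else
          result.insert c2 [1]
      else if c1 > 0 then
        if result.contains c2 then
          result.insert c2 ((result.getD c2 []) ++ [PySem.List.pyGetD (result.getD c2 []) (c1 - 1) 0])
        else
          result
      else
        result.insert c2 [0]) result) (PySem.Dict.empty : PySem.Dict String (List Int))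
  result.items

-- ===== PORT B =====
-- B's inner scan: running count, appending the count at every position
def pvRankScan (c : String) (lastCol : List String) : List Int × Int :=
  lastCol.foldl (fun acc x =>
    let count := if x == c then acc.2 + 1 else acc.2
    (acc.1 ++ [count], count)) ([], 0)

def occurenceTable_alt (characterList : Option (List String)) (lastCol : List String) : List (String × List Int) :=
  let characters := match characterList with
    | none => ["A", "C", "G", "T"]
    | some l => l
  if lastCol.isEmpty then []
  else
    (characters.foldl (fun d c => d.insert c (pvRankScan c lastCol).1)
      (PySem.Dict.empty : PySem.Dict String (List Int))).items

-- ===== PRECONDITION & SPEC =====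
-- Pre_ excludes character lists with a duplicate entry (when lastCol is non-empty): a duplicated
-- entry makes A's inner loop hit the same dict key once per duplicate, and the accidental value
-- of that dict-key collision is not one either implementation would be specified to produce.
def Pre_occurenceTable (characterList : Option (List String)) (lastCol : List String) : Prop :=
  (characterList.getD []).Nodup ∨ lastCol = []
instance (characterList : Option (List String)) (lastCol : List String) : Decidable (Pre_occurenceTable characterList lastCol) := by unfold Pre_occurenceTable; infer_instance

def pvWitness_occurenceTable : Option (List String) × List String := (some ["A", "B"], ["B", "A"])

def Spec_occurenceTable (characterList : Option (List String)) (lastCol : List String) (out : List (String × List Int)) : Prop := out = occurenceTable_alt characterList lastCol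
instance (characterList : Option (List String)) (lastCol : List String) (out : List (String × List Int)) : Decidable (Spec_occurenceTable characterList lastCol out) := by unfold Spec_occurenceTable; infer_instance

-- ===== CLAIM =====
def Claim_equal_occurenceTable : Prop := ∀ (characterList : Option (List String)) (lastCol : List String), Dom_occurenceTable characterList lastCol → Pre_occurenceTable characterList lastCol → Spec_occurenceTable characterList lastCol (occurenceTable characterList lastCol)

-- ===== LEMMAS AND PROOFS =====

-- proof-only name for A's inner-loop body
def pvInner (lastCol : List String) (c1 : Int) (result : PySem.Dict String (List Int)) (c2 : String) : PySem.Dict String (List Int) :=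
  if PySem.List.pyGetD lastCol c1 "" == c2 then
    if result.contains c2 then
      result.insert c2 ((result.getD c2 []) ++ [PySem.List.pyGetD (result.getD c2 []) (c1 - 1) 0 + 1])
    else
      result.insert c2 [1]
  else if c1 > 0 then
    if result.contains c2 then
      result.insert c2 ((result.getD c2 []) ++ [PySem.List.pyGetD (result.getD c2 []) (c1 - 1) 0])
    else
      result
  else
    result.insert c2 [0]

theorem occurenceTable_eq_pvInner (characterList : Option (List String)) (lastCol : List String) :
    occurenceTable characterList lastCol =
      ((PySem.List.pyRange 0 (lastCol.length : Int) 1).foldl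
        (fun result c1 => (match characterList with
          | none => ["A", "C", "G", "T"]
          | some l => l).foldl (pvInner lastCol c1) result)
        (PySem.Dict.empty : PySem.Dict String (List Int))).items := rfl

theorem pvRankScan_fold_snd (c : String) (p : List String) : ∀ (acc : List Int × Int),
    (p.foldl (fun acc x =>
      let count := if x == c then acc.2 + 1 else acc.2
      (acc.1 ++ [count], count)) acc).2 = acc.2 + p.count c := by
  induction p with
  | nil => intro acc; simp
  | cons x p ih =>
    intro acc
    rw [List.foldl_cons, ih, List.count_cons]
    by_cases hx : (x == c) = true
    · simp [hx]; omega
    · simp [hx]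

theorem pvRankScan_append (c x : String) (p : List String) :
    (pvRankScan c (p ++ [x])).1
      = (pvRankScan c p).1 ++ [((p.count c : Int) + if x == c then 1 else 0)] := by
  unfold pvRankScan
  rw [List.foldl_append]
  simp only [List.foldl_cons, List.foldl_nil]
  rw [pvRankScan_fold_snd]
  by_cases hx : (x == c) = true <;> simp [hx]

theorem pvRankScan_fold_len (c : String) (p : List String) : ∀ (acc : List Int × Int),
    (p.foldl (fun acc x =>
      let count := if x == c then acc.2 + 1 else acc.2
      (acc.1 ++ [count], count)) acc).1.length = acc.1.length + p.length := by
  induction p with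
  | nil => intro acc; simp
  | cons x p ih => intro acc; rw [List.foldl_cons, ih]; simp; omega

theorem pvRankScan_length (c : String) (p : List String) :
    (pvRankScan c p).1.length = p.length := by
  unfold pvRankScan; rw [pvRankScan_fold_len]; simp

theorem pvRankScan_last (c : String) (p : List String) (hp : p ≠ []) :
    PySem.List.pyGetD (pvRankScan c p).1 ((p.length : Int) - 1) 0 = (p.count c : Int) := by
  obtain ⟨q, x, rfl⟩ := List.eq_nil_or_concat p |>.resolve_left hp
  simp only [List.concat_eq_append]
  rw [pvRankScan_append]
  have hidx : ((q ++ [x]).length : Int) - 1 = ((q.length : Nat) : Int) := by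
    simp
  rw [hidx, PySem.List.pyGetD_natCast]
  have hlen : (pvRankScan c q).1.length = q.length := pvRankScan_length c q
  rw [List.getD, List.getElem?_append_right (by omega)]
  simp only [hlen, Nat.sub_self, List.getElem?_cons_zero, Option.getD_some, List.count_append]
  by_cases hx : (x == c) = true <;> simp [List.count_cons, hx]

theorem pvInner_zero_fold (lastCol : List String) : ∀ (cs : List String) (d : PySem.Dict String (List Int)),
    cs.Nodup → (∀ c ∈ cs, d.contains c = false) →
    (cs.foldl (pvInner lastCol 0) d).items
      = d.items ++ cs.map (fun c => (c, [if PySem.List.pyGetD lastCol 0 "" == c then (1 : Int) else 0])) := by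
  intro cs
  induction cs with
  | nil => intro d _ _; simp
  | cons c cs ih =>
    intro d hnd hfree
    have hc : d.contains c = false := hfree c (by simp)
    have hstep : pvInner lastCol 0 d c
        = d.insert c [if PySem.List.pyGetD lastCol 0 "" == c then (1 : Int) else 0] := by
      unfold pvInner
      by_cases hm : (PySem.List.pyGetD lastCol 0 "" == c) = true <;> simp [hm, hc]
    rw [List.foldl_cons, hstep, ih (d.insert c _) (by exact hnd.of_cons)
      (by
        intro c' hc'
        rw [PySem.Dict.contains_insert]
        have hne : c' ≠ c := by
          rintro rfl; exact (List.nodup_cons.mp hnd).1 hc'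
        simp [hne, hfree c' (by simp [hc'])]),
      PySem.Dict.items_insert_of_not_contains d _ hc]
    simp

theorem pvInner_pos_fold (lastCol : List String) (k : Int) (hk : 1 ≤ k) (v : String → List Int) :
    ∀ (cs : List String) (pre : List (String × List Int)) (d : PySem.Dict String (List Int)),
    (pre.map Prod.fst ++ cs).Nodup →
    d.items = pre ++ cs.map (fun c => (c, v c)) →
    (cs.foldl (pvInner lastCol k) d).items
      = pre ++ cs.map (fun c =>
          (c, v c ++ [PySem.List.pyGetD (v c) (k - 1) 0
                        + if PySem.List.pyGetD lastCol k "" == c then 1 else 0])) := by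
  intro cs
  induction cs with
  | nil => intro pre d _ hitems; simpa using hitems
  | cons c cs ih =>
    intro pre d hnd hitems
    have hkeys : d.keys = pre.map Prod.fst ++ c :: cs := by
      simp only [PySem.Dict.keys, hitems, List.map_append, List.map_cons, List.map_map]
      simp [Function.comp_def]
    have hknd : d.keys.Nodup := by rw [hkeys]; exact hnd
    have hmem : (c, v c) ∈ d.items := by rw [hitems]; simp
    have hget : d.getD c [] = v c := PySem.Dict.getD_of_mem_items d hmem hknd []
    have hcont : d.contains c = true := by
      rw [PySem.Dict.contains_iff_mem_keys, hkeys]; simp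
    have hcfst : c ∉ pre.map Prod.fst := by
      have hdis := (List.nodup_append.mp hnd).2.2
      intro hmemc
      exact hdis c hmemc c (by simp) rfl
    have hccs : c ∉ cs := (List.nodup_cons.mp ((List.nodup_append.mp hnd).2.1)).1
    set newv : List Int :=
      v c ++ [PySem.List.pyGetD (v c) (k - 1) 0
                + if PySem.List.pyGetD lastCol k "" == c then 1 else 0] with hnewv
    have hstep : pvInner lastCol k d c = d.insert c newv := by
      unfold pvInner
      have hkpos : ¬ ((k : Int) ≤ 0) := by omega
      by_cases hm : (PySem.List.pyGetD lastCol k "" == c) = true <;>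
        simp [hm, hcont, hget, hnewv, show (0:Int) < k by omega]
    have hitems' : (d.insert c newv).items = (pre ++ [(c, newv)]) ++ cs.map (fun c => (c, v c)) := by
      rw [PySem.Dict.items_insert_of_contains d newv hcont, hitems]
      simp only [List.map_append, List.map_cons, List.map_map]
      have h1 : pre.map (fun p => if (p.1 == c) = true then (c, newv) else p) = pre := by
        conv_rhs => rw [← List.map_id pre]
        apply List.map_congr_left
        intro p hp
        have hne : p.1 ≠ c := by
          intro h
          exact hcfst (h ▸ List.mem_map_of_mem hp)
        simp [hne]
      have h2 : cs.map ((fun p => if (p.1 == c) = true then (c, newv) else p) ∘ (fun c => (c, v c)))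
          = cs.map (fun c => (c, v c)) := by
        apply List.map_congr_left
        intro c' hc'
        have hne : c' ≠ c := by rintro rfl; exact hccs hc'
        simp [hne]
      rw [h1, h2]
      simp
    rw [List.foldl_cons, hstep,
      ih (pre ++ [(c, newv)]) (d.insert c newv)
        (by simpa [List.append_assoc] using hnd) hitems']
    simp [hnewv]

theorem pvOuter (characters lastCol : List String) (hnd : characters.Nodup) :
    ∀ k : Nat, 1 ≤ k → k ≤ lastCol.length →
    ((PySem.List.pyRange 0 (k : Int) 1).foldl
        (fun result c1 => characters.foldl (pvInner lastCol c1) result)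
        (PySem.Dict.empty : PySem.Dict String (List Int))).items
      = characters.map (fun c => (c, (pvRankScan c (lastCol.take k)).1)) := by
  intro k
  induction k with
  | zero => intro h; omega
  | succ k ih =>
    intro _ hk
    by_cases hk1 : k = 0
    · subst hk1
      have hr : PySem.List.pyRange 0 ((1 : Nat) : Int) 1 = [0] := by decide
      rw [hr, List.foldl_cons, List.foldl_nil]
      obtain ⟨y, ys, rfl⟩ : ∃ y ys, lastCol = y :: ys := by
        cases lastCol with
        | nil => simp at hk
        | cons y ys => exact ⟨y, ys, rfl⟩
      rw [pvInner_zero_fold (y :: ys) characters PySem.Dict.empty hnd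
        (fun c _ => PySem.Dict.contains_empty c)]
      apply congrArg₂ _ rfl
      apply List.map_congr_left
      intro c _
      have : (pvRankScan c [y]).1 = [if y == c then (1 : Int) else 0] := by
        unfold pvRankScan
        by_cases hy : y = c <;> simp [hy]
      simp [this, PySem.List.pyGetD_zero_cons]
    · have hk1' : 1 ≤ k := by omega
      have hkl : k < lastCol.length := by omega
      have hcast : ((k + 1 : Nat) : Int) = ((k : Nat) : Int) + 1 := by push_cast; ring
      rw [hcast, PySem.List.pyRange_one_succ_right (by positivity), List.foldl_append,
        List.foldl_cons, List.foldl_nil]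
      rw [pvInner_pos_fold lastCol ((k : Nat) : Int) (by omega)
        (fun c => (pvRankScan c (lastCol.take k)).1) characters []
        _ (by simpa using hnd) (by simpa using ih hk1' (by omega))]
      simp only [List.nil_append]
      apply List.map_congr_left
      intro c _
      have htake : lastCol.take (k + 1) = lastCol.take k ++ [lastCol[k]] := by
        rw [List.take_add_one, List.getElem?_eq_getElem hkl]
        rfl
      have hlen : (lastCol.take k).length = k := by
        rw [List.length_take]; omega
      have hlast : PySem.List.pyGetD ((pvRankScan c (lastCol.take k)).1) (((k : Nat) : Int) - 1) 0
          = ((lastCol.take k).count c : Int) := by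
        have := pvRankScan_last c (lastCol.take k) (by
          intro h
          rw [h] at hlen
          simp at hlen
          omega)
        rwa [hlen] at this
      have hx : PySem.List.pyGetD lastCol ((k : Nat) : Int) "" = lastCol[k] := by
        rw [PySem.List.pyGetD_natCast, List.getD_eq_getElem?_getD, List.getElem?_eq_getElem hkl]
        rfl
      rw [htake, pvRankScan_append, hlast, hx]

-- B's dict loop over fresh distinct keys appends its items in order
theorem pvFreshFold (f : String → List Int) : ∀ (cs : List String) (d : PySem.Dict String (List Int)),
    cs.Nodup → (∀ c ∈ cs, d.contains c = false) →
    (cs.foldl (fun d c => d.insert c (f c)) d).items = d.items ++ cs.map (fun c => (c, f c)) := by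
  intro cs
  induction cs with
  | nil => intro d _ _; simp
  | cons c cs ih =>
    intro d hnd hfree
    have hc : d.contains c = false := hfree c (by simp)
    rw [List.foldl_cons, ih (d.insert c (f c)) hnd.of_cons
      (by
        intro c' hc'
        rw [PySem.Dict.contains_insert]
        have hne : c' ≠ c := by
          rintro rfl; exact (List.nodup_cons.mp hnd).1 hc'
        simp [hne, hfree c' (by simp [hc'])]),
      PySem.Dict.items_insert_of_not_contains d _ hc]
    simp

theorem pvMainStep (characters : List String) (hnd : characters.Nodup) (y : String) (ys : List String) :
    ((PySem.List.pyRange 0 (((y :: ys).length : Nat) : Int) 1).foldl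
        (fun result c1 => characters.foldl (pvInner (y :: ys) c1) result)
        (PySem.Dict.empty : PySem.Dict String (List Int))).items
      = (characters.foldl (fun d c => d.insert c (pvRankScan c (y :: ys)).1)
          (PySem.Dict.empty : PySem.Dict String (List Int))).items := by
  have hA := pvOuter characters (y :: ys) hnd (y :: ys).length (by simp) (le_refl _)
  rw [List.take_length] at hA
  rw [hA, pvFreshFold (fun c => (pvRankScan c (y :: ys)).1) characters PySem.Dict.empty hnd
    (fun c _ => PySem.Dict.contains_empty c)]
  simp
  rfl

-- ===== VERDICT =====
theorem occurenceTable_spec : Claim_equal_occurenceTable := by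
  intro characterList lastCol _ hPre
  cases hcol : lastCol with
  | nil =>
    cases characterList <;> rfl
  | cons y ys =>
    subst hcol
    cases characterList with
    | none =>
      rw [occurenceTable_eq_pvInner]
      show ((PySem.List.pyRange 0 (((y :: ys).length : Nat) : Int) 1).foldl
          (fun result c1 => (["A", "C", "G", "T"] : List String).foldl (pvInner (y :: ys) c1) result)
          PySem.Dict.empty).items = _
      exact pvMainStep ["A", "C", "G", "T"] (by decide) y ys
    | some l =>
      have hnl : l.Nodup := by
        rcases hPre with h | h
        · simpa using h
        · simp at h
      rw [occurenceTable_eq_pvInner]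
      show ((PySem.List.pyRange 0 (((y :: ys).length : Nat) : Int) 1).foldl
          (fun result c1 => l.foldl (pvInner (y :: ys) c1) result)
          PySem.Dict.empty).items = _
      exact pvMainStep l hnl y ys
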